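-- pv_equiv track=rewrite | github.com/VenkateshSrini/code-gen-agent | spec_templates.py | _extract_template_main_sections
-- ===== SOURCE A (Python) =====
-- from typing import Optional, List, Dict
--
-- def _extract_template_main_sections(template_content: str) -> str:
--     """Strip comment-heavy guidance to reduce token usage while keeping structure."""
--     lines = template_content.splitlines()
--     kept: List[str] = []
--     in_html_comment = False
--     for line in lines:
--         stripped = line.strip()
--         if stripped.startswith("<!--"):
--             in_html_comment = True
--         if not in_html_comment:
--             kept.append(line)
--         if in_html_comment and stripped.endswith("-->"):
--             in_html_comment = False
--     compact = "\n".join(kept).strip()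
--     return compact if compact else template_content
-- ===== SOURCE B (Python) =====
-- def _extract_template_main_sections(template_content: str) -> str:
--     """Strip comment-heavy guidance to reduce token usage while keeping structure."""
--     lines = template_content.splitlines()
--     kept = []
--     i = 0
--     n = len(lines)
--     while i < n:
--         if lines[i].strip().startswith("<!--"):
--             # skip the whole comment block: up to and including the closing line
--             while i < n and not lines[i].strip().endswith("-->"):
--                 i += 1
--             i += 1
--         else:
--             kept.append(lines[i])
--             i += 1
--     compact = "\n".join(kept).strip()
--     return compact if compact else template_content
-- ===== Notes on version B (the rewrite author's own statement) =====
-- stated objective: alternative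
-- what changed: Replaced the single-pass boolean-flag state machine with an index-based outer scan plus an inner skip loop that consumes each HTML-comment block wholesale.
import Mathlib
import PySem

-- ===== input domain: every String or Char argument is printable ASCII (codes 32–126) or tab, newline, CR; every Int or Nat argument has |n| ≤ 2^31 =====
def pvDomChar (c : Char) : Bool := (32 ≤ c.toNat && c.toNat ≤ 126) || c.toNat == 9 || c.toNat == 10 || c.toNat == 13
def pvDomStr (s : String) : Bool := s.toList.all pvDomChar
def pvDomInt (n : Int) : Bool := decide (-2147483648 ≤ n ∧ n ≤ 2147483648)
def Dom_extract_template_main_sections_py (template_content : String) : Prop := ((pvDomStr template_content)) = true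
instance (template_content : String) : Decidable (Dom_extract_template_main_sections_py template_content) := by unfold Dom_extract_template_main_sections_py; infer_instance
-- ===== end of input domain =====

-- B replaces A's boolean-flag single pass by an outer scan with an inner comment-skipping loop (alternative decomposition, same cost).

-- ===== PORT A =====
-- one iteration of A's for-loop over (kept, in_html_comment)
def pvStepA (st : List String × Bool) (line : String) : List String × Bool :=
  let stripped := PySem.Str.strip line
  let inc1 := st.2 || PySem.Str.startswith stripped "<!--"
  let kept' := if inc1 then st.1 else st.1 ++ [line]
  let inc2 := if inc1 && PySem.Str.endswith stripped "-->" then false else inc1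
  (kept', inc2)

def extract_template_main_sections_py (template_content : String) : String :=
  let lines := PySem.Str.splitlines template_content
  let st := lines.foldl pvStepA (([] : List String), false)
  let compact := PySem.Str.strip (PySem.Str.join "\n" st.1)
  if compact = "" then template_content else compact

-- ===== PORT B =====
-- outer scan: drop comment blocks via pvSkipB; pvSkipB consumes lines until (inclusively) one whose strip ends with "-->"
mutual
def pvKeepB : List String → List String
  | [] => []
  | l :: rest =>
    if PySem.Str.startswith (PySem.Str.strip l) "<!--" then
      if PySem.Str.endswith (PySem.Str.strip l) "-->" then pvKeepB rest
      else pvSkipB rest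
    else
      l :: pvKeepB rest
def pvSkipB : List String → List String
  | [] => []
  | l :: rest =>
    if PySem.Str.endswith (PySem.Str.strip l) "-->" then pvKeepB rest
    else pvSkipB rest
end

def extract_template_main_sections_py_alt (template_content : String) : String :=
  let kept := pvKeepB (PySem.Str.splitlines template_content)
  let compact := PySem.Str.strip (PySem.Str.join "\n" kept)
  if compact = "" then template_content else compact

-- ===== PRECONDITION & SPEC =====
def Spec_extract_template_main_sections_py (template_content : String) (out : String) : Prop := out = extract_template_main_sections_py_alt template_content
instance (template_content : String) (out : String) : Decidable (Spec_extract_template_main_sections_py template_content out) := by unfold Spec_extract_template_main_sections_py; infer_instance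

-- ===== CLAIM (what is proved, stated in full; the proofs are below) =====
def Claim_equal_extract_template_main_sections_py : Prop := ∀ (template_content : String), Dom_extract_template_main_sections_py template_content → Spec_extract_template_main_sections_py template_content (extract_template_main_sections_py template_content)

-- ===== LEMMAS AND PROOFS =====

-- A's fold with flag b from accumulator acc keeps acc ++ (skip-mode or keep-mode result of B)
theorem pvFold_eq (ls : List String) : ∀ (acc : List String) (b : Bool),
    (ls.foldl pvStepA (acc, b)).1 = acc ++ (if b then pvSkipB ls else pvKeepB ls) := by
  induction ls with
  | nil => intro acc b; cases b <;> simp [pvKeepB, pvSkipB]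
  | cons l rest ih =>
    intro acc b
    cases b with
    | true =>
      simp only [List.foldl_cons, pvStepA, pvSkipB, Bool.true_or]
      by_cases h : PySem.Str.endswith (PySem.Str.strip l) "-->" = true <;>
        · simp at h
          simp [h, ih]
    | false =>
      simp only [List.foldl_cons, pvStepA, Bool.false_or]
      by_cases hs : PySem.Str.startswith (PySem.Str.strip l) "<!--" = true
      · by_cases h : PySem.Str.endswith (PySem.Str.strip l) "-->" = true <;>
          · simp at hs h
            simp [hs, h, ih, pvKeepB]
      · simp at hs
        simp [hs, ih, pvKeepB]

-- ===== VERDICT (by name: the statement is the Claim_ definition above) =====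
theorem extract_template_main_sections_py_spec : Claim_equal_extract_template_main_sections_py := by
  intro t _
  unfold Spec_extract_template_main_sections_py extract_template_main_sections_py
    extract_template_main_sections_py_alt
  simp [pvFold_eq]
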